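-- pv_equiv track=rewrite | github.com/alekseikoznov/checking-correctness | task_2.py | group_versions
-- ===== SOURCE A (Python) =====
-- from collections import defaultdict
--
-- def group_versions(list_version):
--     version_count = defaultdict(int)
--
--     for pair in list_version:
--         id, version = pair
--         version_count[(id, version)] += 1
--
--     result = [
--         [id, version, count] for (id, version), count in version_count.items()
--     ]
--     return result
-- ===== SOURCE B (Python) =====
-- def group_versions(list_version):
--     seen = []
--     result = []
--     for pair in list_version:
--         id, version = pair
--         key = (id, version)
--         if key not in seen:
--             seen.append(key)
--             count = 0
--             for other in list_version:
--                 i, v = other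
--                 if (i, v) == key:
--                     count += 1
--             result.append([id, version, count])
--     return result
-- ===== Notes on version B (the rewrite author's own statement) =====
-- stated objective: alternative
-- what changed: Replaces the single-pass defaultdict counter with a discover-then-rescan scheme: one pass finds each (id, version) key at its first appearance, and a full rescan of the list counts that key's occurrences.
import Mathlib
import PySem

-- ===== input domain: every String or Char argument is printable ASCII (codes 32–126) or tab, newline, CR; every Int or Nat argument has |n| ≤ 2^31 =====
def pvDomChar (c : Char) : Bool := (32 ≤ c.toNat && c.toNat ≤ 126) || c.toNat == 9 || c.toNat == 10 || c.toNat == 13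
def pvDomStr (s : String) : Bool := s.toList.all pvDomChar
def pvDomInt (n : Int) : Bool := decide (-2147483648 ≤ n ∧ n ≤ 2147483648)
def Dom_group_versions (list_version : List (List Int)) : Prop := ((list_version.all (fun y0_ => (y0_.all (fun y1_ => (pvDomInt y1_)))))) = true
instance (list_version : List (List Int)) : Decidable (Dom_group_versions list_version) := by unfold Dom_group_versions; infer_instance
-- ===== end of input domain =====

-- B replaces A's single-pass defaultdict counter by a discover-then-rescan nested pass
-- (first-appearance keys, each counted by a fresh scan of the whole list); same output, alternative structure.

-- shared helper: 'id, version = pair' (ValueError unless the element has length 2 — excluded by Pre_)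
def pvUnpack (p : List Int) : Int × Int :=
  match p with
  | [a, b] => (a, b)
  | _ => (0, 0)

-- ===== PORT A =====
def group_versions (list_version : List (List Int)) : List (List Int) :=
  (list_version.foldl
      (fun d pair => d.insert (pvUnpack pair) (d.getD (pvUnpack pair) 0 + 1))
      (PySem.Dict.empty : PySem.Dict (Int × Int) Int)).items.map
    (fun kv => [kv.1.1, kv.1.2, kv.2])

-- ===== PORT B =====
def pvCountKey (list_version : List (List Int)) (key : Int × Int) : Int :=
  list_version.foldl (fun count other => if pvUnpack other = key then count + 1 else count) 0

def group_versions_alt (list_version : List (List Int)) : List (List Int) :=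
  (list_version.foldl
      (fun (st : List (Int × Int) × List (List Int)) pair =>
        if pvUnpack pair ∈ st.1 then st
        else (st.1 ++ [pvUnpack pair],
              st.2 ++ [[(pvUnpack pair).1, (pvUnpack pair).2,
                        pvCountKey list_version (pvUnpack pair)]]))
      ([], [])).2

-- ===== PRECONDITION & SPEC =====
-- Pre_ excludes exactly the inputs where Python A raises ValueError: an element that is not a length-2 pair.
def Pre_group_versions (list_version : List (List Int)) : Prop :=
  ∀ p ∈ list_version, p.length = 2
instance (list_version : List (List Int)) : Decidable (Pre_group_versions list_version) := by
  unfold Pre_group_versions; infer_instance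
def pvWitness_group_versions : List (List Int) := [[1, 2], [1, 2], [3, 4]]

def Spec_group_versions (list_version : List (List Int)) (out : List (List Int)) : Prop := out = group_versions_alt list_version
instance (list_version : List (List Int)) (out : List (List Int)) : Decidable (Spec_group_versions list_version out) := by unfold Spec_group_versions; infer_instance

-- ===== CLAIM (what is proved, stated in full; the proofs are below) =====
def Claim_equal_group_versions : Prop := ∀ (list_version : List (List Int)), Dom_group_versions list_version → Pre_group_versions list_version → Spec_group_versions list_version (group_versions list_version)

-- ===== LEMMAS AND PROOFS =====

-- the inner counting loop is List.count
theorem pv_foldl_count (k : Int × Int) (l : List (Int × Int)) (c : Int) :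
    l.foldl (fun c x => if x = k then c + 1 else c) c = c + l.count k := by
  induction l generalizing c with
  | nil => simp
  | cons x l ih =>
    simp only [List.foldl_cons, ih, List.count_cons]
    by_cases h : x = k
    · subst h
      simp
      omega
    · simp [h]

theorem pv_foldl_map {α β γ : Type} (f : α → β) (g : γ → β → γ) (l : List α) (i : γ) :
    l.foldl (fun s x => g s (f x)) i = (l.map f).foldl g i := by
  induction l generalizing i with
  | nil => rfl
  | cons a l ih => simp [ih]

-- B's discover loop: seen evolves as PySem.Set.update, result appends f of each new key
theorem pv_bloop (f : (Int × Int) → List Int) (ks : List (Int × Int))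
    (seen : List (Int × Int)) (acc : List (List Int)) :
    ks.foldl (fun (st : List (Int × Int) × List (List Int)) k =>
        if k ∈ st.1 then st else (st.1 ++ [k], st.2 ++ [f k])) (seen, acc)
      = (PySem.Set.update seen ks,
         acc ++ ((PySem.Set.update seen ks).drop seen.length).map f) := by
  induction ks generalizing seen acc with
  | nil => simp [PySem.Set.update]
  | cons k ks ih =>
    rw [PySem.Set.update_cons]
    by_cases h : k ∈ seen
    · rw [PySem.Set.add_of_mem h]
      simpa [h] using ih seen acc
    · rw [PySem.Set.add_of_not_mem h]
      simp only [List.foldl_cons, if_neg h]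
      rw [ih]
      have hpref : PySem.Set.update (seen ++ [k]) ks
          = (seen ++ [k]) ++ ((PySem.Set.ofList ks).filter (fun y => !(PySem.Set.contains (seen ++ [k]) y))) :=
        PySem.Set.update_eq_append_filter _ _
      rw [hpref, List.drop_left (l₁ := seen ++ [k]), List.append_assoc seen [k],
        List.drop_left (l₁ := seen)]
      simp

theorem group_versions_eq (lv : List (List Int)) :
    group_versions lv
      = (PySem.Set.ofList (lv.map pvUnpack)).map
          (fun k => [k.1, k.2, ((lv.map pvUnpack).count k : Int)]) := by
  unfold group_versions
  rw [show lv.foldl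
        (fun d pair => d.insert (pvUnpack pair) (d.getD (pvUnpack pair) 0 + 1))
        (PySem.Dict.empty : PySem.Dict (Int × Int) Int)
      = (lv.map pvUnpack).foldl (fun d k => d.insert k (d.getD k 0 + 1)) PySem.Dict.empty
    from pv_foldl_map pvUnpack (fun (d : PySem.Dict (Int × Int) Int) k => d.insert k (d.getD k 0 + 1)) lv PySem.Dict.empty]
  rw [PySem.Dict.foldl_insert_getD_add_one_eq_counter, PySem.Dict.items_counter]
  simp [List.map_map, Function.comp]

theorem group_versions_alt_eq (lv : List (List Int)) :
    group_versions_alt lv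
      = (PySem.Set.ofList (lv.map pvUnpack)).map
          (fun k => [k.1, k.2, ((lv.map pvUnpack).count k : Int)]) := by
  unfold group_versions_alt
  rw [show lv.foldl
        (fun (st : List (Int × Int) × List (List Int)) pair =>
          if pvUnpack pair ∈ st.1 then st
          else (st.1 ++ [pvUnpack pair],
                st.2 ++ [[(pvUnpack pair).1, (pvUnpack pair).2, pvCountKey lv (pvUnpack pair)]]))
        ([], [])
      = (lv.map pvUnpack).foldl (fun st k =>
          if k ∈ st.1 then st
          else (st.1 ++ [k], st.2 ++ [[k.1, k.2, pvCountKey lv k]])) ([], [])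
    from pv_foldl_map pvUnpack
      (fun (st : List (Int × Int) × List (List Int)) k =>
        if k ∈ st.1 then st else (st.1 ++ [k], st.2 ++ [[k.1, k.2, pvCountKey lv k]]))
      lv ([], [])]
  rw [pv_bloop]
  have hupd : PySem.Set.update ([] : List (Int × Int)) (lv.map pvUnpack)
      = PySem.Set.ofList (lv.map pvUnpack) := PySem.Set.update_nil_left _
  rw [hupd]
  simp only [List.nil_append, List.length_nil, List.drop_zero]
  apply List.map_congr_left
  intro k _
  have : pvCountKey lv k = ((lv.map pvUnpack).count k : Int) := by
    unfold pvCountKey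
    rw [pv_foldl_map pvUnpack (fun (c : Int) x => if x = k then c + 1 else c) lv 0]
    rw [pv_foldl_count]
    ring
  rw [this]

-- ===== VERDICT (by name: the statement is the Claim_ definition above) =====
theorem group_versions_spec : Claim_equal_group_versions := by
  intro lv _ _
  unfold Spec_group_versions
  rw [group_versions_eq, group_versions_alt_eq]
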